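-- pv_equiv track=rewrite | github.com/LionelROLLAND/colocatron | project/task.py | less_than_n_consecutive_days_absent
-- ===== SOURCE A (Python) =====
-- def less_than_n_consecutive_days_absent(
--     available_days: list[bool], n_days: int
-- ) -> bool:
--     """Return True if the available days contain less than n consecutive absent days."""
--     occ = -1
--     max_absent_days = 0
--     for k, available in enumerate(available_days):
--         if available:
--             max_absent_days = max(max_absent_days, k - occ - 1)
--             occ = k
--     max_absent_days = max(max_absent_days, 7 - occ - 1)
--     return max_absent_days < n_days
-- ===== SOURCE B (Python) =====
-- def less_than_n_consecutive_days_absent(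
--     available_days: list[bool], n_days: int
-- ) -> bool:
--     """Return True if the available days contain less than n consecutive absent days."""
--     positions = [k for k, a in enumerate(available_days) if a]
--     guard = [-1] + positions + [7]
--     max_absent = max(guard[i + 1] - guard[i] - 1 for i in range(len(guard) - 1))
--     return max_absent < n_days
-- ===== Notes on version B (the rewrite author's own statement) =====
-- stated objective: alternative
-- what changed: Replaces A's fused single-pass running state (last-seen index occ + running max) with an explicit list of available-day indices framed by sentinels -1 and 7, then a pairwise adjacent-difference max over that guard list.
import Mathlib
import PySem

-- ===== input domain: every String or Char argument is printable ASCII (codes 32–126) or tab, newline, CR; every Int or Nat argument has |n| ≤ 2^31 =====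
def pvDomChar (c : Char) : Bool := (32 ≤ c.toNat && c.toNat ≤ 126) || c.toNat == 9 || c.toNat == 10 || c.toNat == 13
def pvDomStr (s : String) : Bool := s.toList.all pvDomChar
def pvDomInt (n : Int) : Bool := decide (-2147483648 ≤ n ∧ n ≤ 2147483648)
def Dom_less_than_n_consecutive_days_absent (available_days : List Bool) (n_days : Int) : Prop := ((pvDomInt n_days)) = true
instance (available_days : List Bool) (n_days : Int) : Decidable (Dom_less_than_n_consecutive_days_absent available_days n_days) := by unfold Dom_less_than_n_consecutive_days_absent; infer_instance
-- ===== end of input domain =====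

-- B replaces A's fused single-pass running state with an index list framed by sentinels (-1, 7)
-- and a pairwise adjacent-gap maximum; same cost (objective: alternative).

-- ===== PORT A =====
-- A's for-loop over enumerate with state (occ, max_absent_days); k is the running index.
def pvALoop (xs : List Bool) (k occ m : Int) : Int × Int :=
  match xs with
  | [] => (occ, m)
  | a :: rest =>
    if a then pvALoop rest (k + 1) k (max m (k - occ - 1))
    else pvALoop rest (k + 1) occ m

def less_than_n_consecutive_days_absent (available_days : List Bool) (n_days : Int) : Bool :=
  let r := pvALoop available_days 0 (-1) 0
  decide (max r.2 (7 - r.1 - 1) < n_days)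

-- ===== PORT B =====
-- [k for k, a in enumerate(available_days) if a]
def pvPositions (xs : List Bool) (k : Int) : List Int :=
  match xs with
  | [] => []
  | a :: rest => if a then k :: pvPositions rest (k + 1) else pvPositions rest (k + 1)

-- max(guard[i+1] - guard[i] - 1 ...): max of adjacent gaps of prev :: l (l nonempty in use).
def pvMaxGaps (prev : Int) (l : List Int) : Int :=
  match l with
  | [] => 0  -- unreachable: pvMaxGaps is only applied to nonempty lists (guard ends with 7)
  | [x] => x - prev - 1
  | x :: y :: rest => max (x - prev - 1) (pvMaxGaps x (y :: rest))

def less_than_n_consecutive_days_absent_alt (available_days : List Bool) (n_days : Int) : Bool :=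
  decide (pvMaxGaps (-1) (pvPositions available_days 0 ++ [7]) < n_days)

-- ===== PRECONDITION & SPEC =====
def Spec_less_than_n_consecutive_days_absent (available_days : List Bool) (n_days : Int) (out : Bool) : Prop := out = less_than_n_consecutive_days_absent_alt available_days n_days
instance (available_days : List Bool) (n_days : Int) (out : Bool) : Decidable (Spec_less_than_n_consecutive_days_absent available_days n_days out) := by unfold Spec_less_than_n_consecutive_days_absent; infer_instance

-- ===== CLAIM (what is proved, stated in full; the proofs are below) =====
def Claim_equal_less_than_n_consecutive_days_absent : Prop := ∀ (available_days : List Bool) (n_days : Int), Dom_less_than_n_consecutive_days_absent available_days n_days → Spec_less_than_n_consecutive_days_absent available_days n_days (less_than_n_consecutive_days_absent available_days n_days)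

-- ===== LEMMAS AND PROOFS =====

theorem pvMaxGaps_cons_append (prev x : Int) (l : List Int) :
    pvMaxGaps prev (x :: (l ++ [7])) = max (x - prev - 1) (pvMaxGaps x (l ++ [7])) := by
  cases l <;> simp [pvMaxGaps]

-- loop invariant: the final max computed by A's loop (including the trailing 7 term)
-- equals m ⊔ the max gap of the remaining positions framed by occ and 7
theorem pvALoop_eq_gaps (xs : List Bool) (k occ m : Int) :
    max (pvALoop xs k occ m).2 (7 - (pvALoop xs k occ m).1 - 1)
      = max m (pvMaxGaps occ (pvPositions xs k ++ [7])) := by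
  induction xs generalizing k occ m with
  | nil => simp [pvALoop, pvPositions, pvMaxGaps]
  | cons a rest ih =>
    cases a with
    | false => simpa [pvALoop, pvPositions] using ih (k + 1) occ m
    | true =>
      simp only [pvALoop, pvPositions, if_true, List.cons_append]
      rw [ih (k + 1) k (max m (k - occ - 1)), pvMaxGaps_cons_append]
      exact max_assoc m (k - occ - 1) _

theorem pvPositions_head_ge (xs : List Bool) (k p : Int) (rest : List Int)
    (h : pvPositions xs k = p :: rest) : k ≤ p := by
  induction xs generalizing k with
  | nil => simp [pvPositions] at h
  | cons a tl ih =>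
    by_cases ha : a = true
    · simp [pvPositions, ha] at h
      omega
    · simp [pvPositions, ha] at h
      have := ih (k + 1) h
      omega

theorem pvMaxGaps_nonneg (xs : List Bool) :
    0 ≤ pvMaxGaps (-1) (pvPositions xs 0 ++ [7]) := by
  cases h : pvPositions xs 0 with
  | nil => simp [pvMaxGaps]
  | cons p rest =>
    have hp : (0 : Int) ≤ p := pvPositions_head_ge xs 0 p rest h
    rw [List.cons_append, pvMaxGaps_cons_append]
    exact le_max_of_le_left (by omega)

-- ===== VERDICT (by name: the statement is the Claim_ definition above) =====
theorem less_than_n_consecutive_days_absent_spec : Claim_equal_less_than_n_consecutive_days_absent := by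
  intro xs n _
  unfold Spec_less_than_n_consecutive_days_absent
  unfold less_than_n_consecutive_days_absent less_than_n_consecutive_days_absent_alt
  have h := pvALoop_eq_gaps xs 0 (-1) 0
  have h0 := pvMaxGaps_nonneg xs
  simp only [h, max_eq_right h0]
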